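-- pv_equiv track=rewrite | github.com/dreamhunteryin/hpc_ibsafe_cbd_v1 | src/sam3/data/endoscapes.py | resolve_selected_categories
-- ===== SOURCE A (Python) =====
-- from typing import Iterable, Optional
--
-- def normalize_category_name(name: str) -> str:
--     return name.strip().lower()
--
-- def resolve_selected_categories(categories: dict[int, str], selected_names: Optional[Iterable[str]]):
--     if isinstance(selected_names, str):
--         selected_names = [part for part in selected_names.split(",") if part.strip()]
--     elif selected_names is None:
--         selected_names = []
--
--     sorted_category_ids = sorted(categories)
--     if not selected_names:
--         return sorted_category_ids, [categories[cat_id] for cat_id in sorted_category_ids]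
--
--     name_to_id = {
--         normalize_category_name(category_name): category_id
--         for category_id, category_name in categories.items()
--     }
--
--     selected_category_ids = []
--     canonical_names = []
--     seen_category_ids = set()
--     unknown_names = []
--     for raw_name in selected_names:
--         normalized_name = normalize_category_name(raw_name)
--         category_id = name_to_id.get(normalized_name)
--         if category_id is None:
--             unknown_names.append(raw_name)
--             continue
--         if category_id in seen_category_ids:
--             continue
--         seen_category_ids.add(category_id)
--         selected_category_ids.append(category_id)
--         canonical_names.append(categories[category_id])
--
--     if unknown_names:
--         valid_names = ", ".join(categories[cat_id] for cat_id in sorted_category_ids)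
--         raise ValueError(f"Unknown class names: {unknown_names}. Valid class names: {valid_names}")
--
--     return selected_category_ids, canonical_names
-- ===== SOURCE B (Python) =====
-- from typing import Iterable, Optional
--
-- def normalize_category_name(name: str) -> str:
--     return name.strip().lower()
--
-- def resolve_selected_categories(categories: dict[int, str], selected_names: Optional[Iterable[str]]):
--     if isinstance(selected_names, str):
--         selected_names = [part for part in selected_names.split(",") if part.strip()]
--     names = list(selected_names) if selected_names is not None else []
--
--     if not names:
--         ids = sorted(categories)
--         return ids, [categories[i] for i in ids]
--
--     # pass 1: first position of each normalized requested name
--     first_pos = {}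
--     for idx, raw in enumerate(names):
--         first_pos.setdefault(normalize_category_name(raw), idx)
--
--     # pass 2: one sweep over the categories; last category wins per normalized name,
--     # tagging each matched category with the request's first position
--     chosen = {}
--     for cid, cname in categories.items():
--         key = normalize_category_name(cname)
--         if key in first_pos:
--             chosen[key] = (first_pos[key], cid, cname)
--
--     if len(chosen) < len(first_pos):
--         unknown = [r for r in names if normalize_category_name(r) not in chosen]
--         valid = ", ".join(categories[i] for i in sorted(categories))
--         raise ValueError(f"Unknown class names: {unknown}. Valid class names: {valid}")
--
--     # sort the matched categories back into request order
--     triples = sorted(chosen.values(), key=lambda t: t[0])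
--     return [cid for _, cid, _ in triples], [cn for _, _, cn in triples]
-- ===== Notes on version B (the rewrite author's own statement) =====
-- stated objective: alternative
-- what changed: A scans the selected names with a name->id lookup dict and a seen-set, accumulating ids and canonical names in one loop; B inverts the traversal: it records the first position of each normalized request, then makes ONE sweep over the categories picking every requested category tagged with that position (no per-name dict lookup, no seen-set), detects unknowns by a size comparison, and finally sorts the picked (position,id,name) triples back into request order.
import Mathlib
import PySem

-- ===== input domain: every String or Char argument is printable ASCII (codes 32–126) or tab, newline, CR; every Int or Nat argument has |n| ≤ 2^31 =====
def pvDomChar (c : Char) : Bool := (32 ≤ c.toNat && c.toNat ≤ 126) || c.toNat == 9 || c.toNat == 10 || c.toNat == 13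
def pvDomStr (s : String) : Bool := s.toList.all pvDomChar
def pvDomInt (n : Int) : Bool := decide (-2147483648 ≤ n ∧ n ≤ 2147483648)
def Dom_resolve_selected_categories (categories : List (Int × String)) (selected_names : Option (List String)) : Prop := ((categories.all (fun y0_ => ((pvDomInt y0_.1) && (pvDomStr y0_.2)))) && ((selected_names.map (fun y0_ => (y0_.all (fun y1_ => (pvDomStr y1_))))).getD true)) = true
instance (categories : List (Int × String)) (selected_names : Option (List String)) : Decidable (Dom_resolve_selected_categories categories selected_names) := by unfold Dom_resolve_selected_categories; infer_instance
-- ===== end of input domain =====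

-- B inverts A's traversal: instead of scanning the selected names with a name->id dict and a
-- seen-set, it records each request's first position, sweeps the categories once picking the
-- requested ones, and sorts the picks back into request order; objective: alternative.


-- ===== PORT A =====
-- normalize_category_name(name) = name.strip().lower()
def pvNorm (s : String) : String := PySem.Str.lower (PySem.Str.strip s)

-- Port of A. Under the type convention selected_names : Option (List String), so the
-- isinstance(selected_names, str) branch is unreachable and not ported; None becomes [].
-- The 'categories' association list stands for the Python dict; PySem.Dict.ofList applies
-- the dict's key-collapsing (last value wins, first position kept), as dict construction does.
-- Where the Python raises ValueError (unknown names) the port returns ([], []); Pre_ excludes that.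
def resolve_selected_categories (categories : List (Int × String)) (selected_names : Option (List String)) : List Int × List String :=
  let sel := selected_names.getD []
  let cats : PySem.Dict Int String := PySem.Dict.ofList categories
  let sorted_ids := PySem.List.sorted cats.keys (fun x => x) false
  if sel.isEmpty then
    (sorted_ids, sorted_ids.map (fun i => cats.getD i ""))
  else
    let name_to_id : PySem.Dict String Int :=
      cats.items.foldl (fun d p => d.insert (pvNorm p.2) p.1) PySem.Dict.empty
    let st := sel.foldl
      (fun (st : List Int × List String × PySem.Set Int × List String) raw =>
        match name_to_id.get? (pvNorm raw) with
        | none => (st.1, st.2.1, st.2.2.1, st.2.2.2 ++ [raw])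
        | some cid =>
          if PySem.Set.contains st.2.2.1 cid then st
          else (st.1 ++ [cid], st.2.1 ++ [cats.getD cid ""], PySem.Set.add st.2.2.1 cid, st.2.2.2))
      ([], [], PySem.Set.empty, [])
    if st.2.2.2.isEmpty then (st.1, st.2.1)
    else ([], [])  -- Python raises ValueError here; excluded by Pre_

-- ===== PORT B =====
-- Port of B (Source B): first-position pass over the requests, one sweep over the categories,
-- size comparison for unknowns, sort of the picked triples back into request order.
def resolve_selected_categories_alt (categories : List (Int × String)) (selected_names : Option (List String)) : List Int × List String :=
  let names := selected_names.getD []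
  let cats : PySem.Dict Int String := PySem.Dict.ofList categories
  if names.isEmpty then
    let ids := PySem.List.sorted cats.keys (fun x => x) false
    (ids, ids.map (fun i => cats.getD i ""))
  else
    let first_pos : PySem.Dict String Int :=
      (PySem.List.enumerate names 0).foldl (fun d p => d.setdefault (pvNorm p.2) p.1) PySem.Dict.empty
    let chosen : PySem.Dict String (Int × Int × String) :=
      cats.items.foldl
        (fun d p =>
          if first_pos.contains (pvNorm p.2) then
            d.insert (pvNorm p.2) (first_pos.getD (pvNorm p.2) 0, p.1, p.2)
          else d)
        PySem.Dict.empty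
    if chosen.size < first_pos.size then ([], [])  -- Python raises ValueError here; excluded by Pre_
    else
      let triples := PySem.List.sorted chosen.values (fun t => t.1) false
      (triples.map (fun t => t.2.1), triples.map (fun t => t.2.2))

-- ===== PRECONDITION & SPEC =====
-- Pre_ excludes exactly the inputs on which the Python raises ValueError: some selected name
-- whose normalization is not the normalization of any category name of the dict.
def Pre_resolve_selected_categories (categories : List (Int × String)) (selected_names : Option (List String)) : Prop :=
  ((selected_names.getD []).all
    (fun s => ((PySem.Dict.ofList categories).values.map pvNorm).contains (pvNorm s))) = true
instance (categories : List (Int × String)) (selected_names : Option (List String)) : Decidable (Pre_resolve_selected_categories categories selected_names) := by unfold Pre_resolve_selected_categories; infer_instance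

def pvWitness_resolve_selected_categories : (List (Int × String)) × Option (List String) :=
  ([(1, "a"), (2, "b")], some [" A ", "b"])

def Spec_resolve_selected_categories (categories : List (Int × String)) (selected_names : Option (List String)) (out : List Int × List String) : Prop := out = resolve_selected_categories_alt categories selected_names
instance (categories : List (Int × String)) (selected_names : Option (List String)) (out : List Int × List String) : Decidable (Spec_resolve_selected_categories categories selected_names out) := by unfold Spec_resolve_selected_categories; infer_instance

-- ===== CLAIM (what is proved, stated in full; the proofs are below) =====
def Claim_equal_resolve_selected_categories : Prop := ∀ (categories : List (Int × String)) (selected_names : Option (List String)), Dom_resolve_selected_categories categories selected_names → Pre_resolve_selected_categories categories selected_names → Spec_resolve_selected_categories categories selected_names (resolve_selected_categories categories selected_names)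

-- ===== LEMMAS AND PROOFS =====

-- abbreviations for the proof (the same expressions the ports build with `let`)
def pvCats (categories : List (Int × String)) : PySem.Dict Int String := PySem.Dict.ofList categories
def pvLookup (categories : List (Int × String)) : PySem.Dict String (Int × String) :=
  (pvCats categories).items.foldl (fun d p => d.insert (pvNorm p.2) p) PySem.Dict.empty
def pvNameToId (categories : List (Int × String)) : PySem.Dict String Int :=
  (pvCats categories).items.foldl (fun d p => d.insert (pvNorm p.2) p.1) PySem.Dict.empty
def pvFP (names : List String) : PySem.Dict String Int :=
  (PySem.List.enumerate names 0).foldl (fun d p => d.setdefault (pvNorm p.2) p.1) PySem.Dict.empty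
def pvChosen (categories : List (Int × String)) (names : List String) : PySem.Dict String (Int × Int × String) :=
  (pvCats categories).items.foldl
    (fun d p =>
      if (pvFP names).contains (pvNorm p.2) then
        d.insert (pvNorm p.2) ((pvFP names).getD (pvNorm p.2) 0, p.1, p.2)
      else d)
    PySem.Dict.empty

-- name_to_id is lookup with values projected to their first component
lemma get?_nameToId_eq (l : List (Int × String)) (d1 : PySem.Dict String Int)
    (d2 : PySem.Dict String (Int × String)) (h : ∀ k, d1.get? k = (d2.get? k).map Prod.fst) (k : String) :
    (l.foldl (fun d p => d.insert (pvNorm p.2) p.1) d1).get? k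
      = ((l.foldl (fun d p => d.insert (pvNorm p.2) p) d2).get? k).map Prod.fst := by
  induction l generalizing d1 d2 with
  | nil => simpa using h k
  | cons q l ih =>
      simp only [List.foldl_cons]
      apply ih
      intro k'
      rw [PySem.Dict.get?_insert, PySem.Dict.get?_insert]
      split_ifs with hk
      · rfl
      · exact h k'

-- provenance of lookup entries
lemma lookup_provenance (l : List (Int × String)) (d : PySem.Dict String (Int × String))
    (k : String) (p : Int × String)
    (h : (l.foldl (fun d q => d.insert (pvNorm q.2) q) d).get? k = some p) :
    d.get? k = some p ∨ (p ∈ l ∧ k = pvNorm p.2) := by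
  induction l generalizing d with
  | nil => exact Or.inl h
  | cons q l ih =>
      simp only [List.foldl_cons] at h
      rcases ih _ h with h' | h'
      · rw [PySem.Dict.get?_insert] at h'
        split_ifs at h' with hk
        · right; cases h'; exact ⟨List.mem_cons_self, hk⟩
        · exact Or.inl h'
      · exact Or.inr ⟨List.mem_cons_of_mem _ h'.1, h'.2⟩

lemma lookup_mem (categories : List (Int × String)) (k : String) (p : Int × String)
    (h : (pvLookup categories).get? k = some p) :
    p ∈ (pvCats categories).items ∧ k = pvNorm p.2 := by
  rcases lookup_provenance _ _ _ _ h with h' | h'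
  · simp [PySem.Dict.get?_empty] at h'
  · exact h'

lemma cats_keys_nodup (categories : List (Int × String)) : (pvCats categories).keys.Nodup :=
  PySem.Dict.nodup_keys_ofList categories

-- the canonical-name lookup categories[id] agrees with the stored pair
lemma lookup_snd (categories : List (Int × String)) (k : String) (p : Int × String)
    (h : (pvLookup categories).get? k = some p) :
    (pvCats categories).getD p.1 "" = p.2 :=
  PySem.Dict.getD_of_mem_items _ (lookup_mem categories k p h).1 (cats_keys_nodup categories) ""

-- ids stored under distinct keys are distinct (dict keys of cats are unique)
lemma lookup_inj (categories : List (Int × String)) (k k' : String) (p p' : Int × String)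
    (h : (pvLookup categories).get? k = some p) (h' : (pvLookup categories).get? k' = some p')
    (hfst : p.1 = p'.1) : k = k' := by
  obtain ⟨hp, hk⟩ := lookup_mem categories k p h
  obtain ⟨hp', hk'⟩ := lookup_mem categories k' p' h'
  have hnd : ((pvCats categories).items.map Prod.fst).Nodup := cats_keys_nodup categories
  have : p = p' := by
    have h1 := List.mem_map_of_mem (f := Prod.fst) hp
    have h2 := List.mem_map_of_mem (f := Prod.fst) hp'
    rcases List.getElem_of_mem hp with ⟨i, hi, rfl⟩
    rcases List.getElem_of_mem hp' with ⟨j, hj, rfl⟩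
    have hij : i = j := by
      by_contra hne
      have := List.Nodup.getElem_inj_iff hnd (i := i) (j := j)
        (hi := by simpa using hi) (hj := by simpa using hj)
      simp only [List.getElem_map] at this
      exact hne (this.mp hfst)
    subst hij; rfl
  subst this
  rw [hk, hk']

-- contains on lookup ↔ the Pre_ membership condition
lemma lookup_contains_iff (categories : List (Int × String)) (k : String) :
    (pvLookup categories).contains k = true ↔ k ∈ (pvCats categories).values.map pvNorm := by
  rw [PySem.Dict.contains_iff_mem_keys]
  unfold pvLookup
  rw [PySem.Dict.keys_foldl_insert_key ((pvCats categories).items) (fun p => pvNorm p.2)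
    (fun _ p => p) PySem.Dict.empty]
  have hv : (pvCats categories).values.map pvNorm = (pvCats categories).items.map (fun p => pvNorm p.2) := by
    simp [PySem.Dict.values, List.map_map, Function.comp_def]
  rw [hv]
  have hupd : PySem.Set.update (PySem.Dict.empty : PySem.Dict String (Int × String)).keys
      ((pvCats categories).items.map (fun p => pvNorm p.2))
      = PySem.Set.ofList ((pvCats categories).items.map (fun p => pvNorm p.2)) := by
    rw [PySem.Set.ofList_eq_foldl]; rfl
  rw [hupd]
  exact PySem.Set.mem_ofList _ _

-- the two output projections the equivalence meets in the middle on
def pvF1 (categories : List (Int × String)) (k : String) : Int := ((pvLookup categories).getD k (0, "")).1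
def pvF2 (categories : List (Int × String)) (k : String) : String := ((pvLookup categories).getD k (0, "")).2

-- MAIN LOOP LEMMA for A: A's fold, started from the state corresponding to an already-picked key
-- list P, produces exactly the update of P with the normalized selected names, mapped through lookups.
lemma loopA_eq (categories : List (Int × String)) (sel : List String)
    (hsel : ∀ r ∈ sel, (pvLookup categories).contains (pvNorm r) = true) :
    ∀ (P : List String) (unk : List String), (∀ x ∈ P, (pvLookup categories).contains x = true) →
    sel.foldl
      (fun (st : List Int × List String × PySem.Set Int × List String) raw =>
        match (pvNameToId categories).get? (pvNorm raw) with
        | none => (st.1, st.2.1, st.2.2.1, st.2.2.2 ++ [raw])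
        | some cid =>
          if PySem.Set.contains st.2.2.1 cid then st
          else (st.1 ++ [cid], st.2.1 ++ [(pvCats categories).getD cid ""], PySem.Set.add st.2.2.1 cid, st.2.2.2))
      (P.map (pvF1 categories), P.map (pvF2 categories), PySem.Set.ofList (P.map (pvF1 categories)), unk)
    = ((PySem.Set.update P (sel.map pvNorm)).map (pvF1 categories),
       (PySem.Set.update P (sel.map pvNorm)).map (pvF2 categories),
       PySem.Set.ofList ((PySem.Set.update P (sel.map pvNorm)).map (pvF1 categories)),
       unk) := by
  induction sel with
  | nil => intro P unk hP; simp [PySem.Set.update]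
  | cons r rest ih =>
      intro P unk hP
      have hr : (pvLookup categories).contains (pvNorm r) = true := hsel r List.mem_cons_self
      have hrest : ∀ r' ∈ rest, (pvLookup categories).contains (pvNorm r') = true :=
        fun r' hr' => hsel r' (List.mem_cons_of_mem _ hr')
      obtain ⟨p, hp⟩ : ∃ p, (pvLookup categories).get? (pvNorm r) = some p := by
        rw [PySem.Dict.contains_eq_isSome_get?] at hr
        exact Option.isSome_iff_exists.mp hr
      have hid : (pvNameToId categories).get? (pvNorm r) = some p.1 := by
        have hbase : ∀ k', (PySem.Dict.empty : PySem.Dict String Int).get? k'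
            = ((PySem.Dict.empty : PySem.Dict String (Int × String)).get? k').map Prod.fst := by
          simp [PySem.Dict.get?_empty]
        have h := get?_nameToId_eq (pvCats categories).items PySem.Dict.empty PySem.Dict.empty
          hbase (pvNorm r)
        unfold pvNameToId
        unfold pvLookup at hp
        rw [h, hp]
        rfl
      have hf1k : pvF1 categories (pvNorm r) = p.1 := by
        simp [pvF1, PySem.Dict.getD_eq_get?_getD, hp]
      have hf2k : pvF2 categories (pvNorm r) = p.2 := by
        simp [pvF2, PySem.Dict.getD_eq_get?_getD, hp]
      have hseen : PySem.Set.contains (PySem.Set.ofList (P.map (pvF1 categories))) p.1 = true ↔ pvNorm r ∈ P := by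
        constructor
        · intro h
          have hmem : p.1 ∈ P.map (pvF1 categories) := by
            have hol := PySem.Set.mem_ofList (xs := P.map (pvF1 categories)) (y := p.1)
            simpa [PySem.Set.contains, List.contains_iff_mem, hol] using h
          obtain ⟨k', hk'P, hk'⟩ := List.mem_map.mp hmem
          obtain ⟨p', hp'⟩ : ∃ p', (pvLookup categories).get? k' = some p' := by
            have hc := hP k' hk'P
            rw [PySem.Dict.contains_eq_isSome_get?] at hc
            exact Option.isSome_iff_exists.mp hc
          have hfst : p'.1 = p.1 := by
            have he : pvF1 categories k' = p'.1 := by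
              simp [pvF1, PySem.Dict.getD_eq_get?_getD, hp']
            rw [he] at hk'; exact hk'
          have hkk := lookup_inj categories k' (pvNorm r) p' p hp' hp hfst
          rwa [hkk] at hk'P
        · intro h
          have hm : p.1 ∈ P.map (pvF1 categories) := List.mem_map.mpr ⟨pvNorm r, h, hf1k⟩
          simpa [PySem.Set.contains, List.contains_iff_mem, PySem.Set.mem_ofList] using hm
      simp only [List.foldl_cons, List.map_cons, hid]
      by_cases hkP : pvNorm r ∈ P
      · rw [if_pos (hseen.mpr hkP)]
        have hadd : PySem.Set.add P (pvNorm r) = P := by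
          simp [PySem.Set.add, PySem.Set.contains, hkP]
        have hupd : PySem.Set.update P (pvNorm r :: rest.map pvNorm)
            = PySem.Set.update P (rest.map pvNorm) := by
          simp [PySem.Set.update, hadd]
        rw [hupd]
        exact ih hrest P unk hP
      · rw [if_neg (fun hcon => hkP (hseen.mp hcon))]
        have hadd : PySem.Set.add P (pvNorm r) = P ++ [pvNorm r] := by
          simp [PySem.Set.add, PySem.Set.contains, hkP]
        have hupd : PySem.Set.update P (pvNorm r :: rest.map pvNorm)
            = PySem.Set.update (P ++ [pvNorm r]) (rest.map pvNorm) := by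
          simp [PySem.Set.update, hadd]
        rw [hupd]
        have hP' : ∀ x ∈ P ++ [pvNorm r], (pvLookup categories).contains x = true := by
          intro x hx
          rcases List.mem_append.mp hx with hx | hx
          · exact hP x hx
          · simp only [List.mem_singleton] at hx; subst hx; exact hr
        have e1 : (P ++ [pvNorm r]).map (pvF1 categories) = P.map (pvF1 categories) ++ [p.1] := by
          simp [hf1k]
        have e2 : (P ++ [pvNorm r]).map (pvF2 categories)
            = P.map (pvF2 categories) ++ [(pvCats categories).getD p.1 ""] := by
          rw [lookup_snd categories (pvNorm r) p hp]; simp [hf2k]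
        have e3 : PySem.Set.ofList (P.map (pvF1 categories) ++ [p.1])
            = PySem.Set.add (PySem.Set.ofList (P.map (pvF1 categories))) p.1 := by
          rw [PySem.Set.ofList_eq_foldl, PySem.Set.ofList_eq_foldl, List.foldl_append]
          rfl
        have hstep := ih hrest (P ++ [pvNorm r]) unk hP'
        rw [e1, e2, e3] at hstep
        exact hstep

-- INVARIANT for B's first_pos fold: keys are the first occurrences in order, and the stored
-- positions grow strictly along the insertion order of the dict.
lemma fp_fold_invariant (xs : List String) :
    ∀ (s : Int) (d : PySem.Dict String Int),
    (∀ v ∈ d.values, v < s) →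
    d.items.Pairwise (fun p q => p.2 < q.2) →
    ((PySem.List.enumerate xs s).foldl (fun d p => d.setdefault (pvNorm p.2) p.1) d).keys
        = PySem.Set.update d.keys (xs.map pvNorm)
      ∧ ((PySem.List.enumerate xs s).foldl (fun d p => d.setdefault (pvNorm p.2) p.1) d).items.Pairwise
          (fun p q => p.2 < q.2) := by
  induction xs with
  | nil =>
      intro s d hv hp
      simp [PySem.List.enumerate_nil, PySem.Set.update]
      exact hp
  | cons x xs ih =>
      intro s d hv hp
      rw [PySem.List.enumerate_cons]
      simp only [List.foldl_cons, List.map_cons]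
      by_cases hc : d.contains (pvNorm x) = true
      · rw [PySem.Dict.setdefault_of_contains d s hc]
        have hkeys : d.keys.contains (pvNorm x) = true := by
          rw [List.contains_iff_mem]
          exact (PySem.Dict.contains_iff_mem_keys _ _).mp hc
        have hmem : pvNorm x ∈ d.keys := (PySem.Dict.contains_iff_mem_keys _ _).mp hc
        have hadd : PySem.Set.add d.keys (pvNorm x) = d.keys := by
          simp [PySem.Set.add, hmem]
        have hupd : PySem.Set.update d.keys (pvNorm x :: xs.map pvNorm)
            = PySem.Set.update d.keys (xs.map pvNorm) := by
          simp [PySem.Set.update, hadd]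
        rw [hupd]
        exact ih (s + 1) d (fun v hvv => lt_trans (hv v hvv) (by omega)) hp
      · rw [PySem.Dict.setdefault_of_not_contains d s (by simpa using hc)]
        have hkeys : (d.insert (pvNorm x) s).keys = d.keys ++ [pvNorm x] :=
          PySem.Dict.keys_insert_of_not_contains d s (by simpa using hc)
        have hitems : (d.insert (pvNorm x) s).items = d.items ++ [(pvNorm x, s)] :=
          PySem.Dict.items_insert_of_not_contains d s (by simpa using hc)
        have hnotmem : ¬ (pvNorm x) ∈ d.keys := by
          intro hm; exact hc ((PySem.Dict.contains_iff_mem_keys _ _).mpr hm)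
        have hadd : PySem.Set.add d.keys (pvNorm x) = d.keys ++ [pvNorm x] := by
          have : d.keys.contains (pvNorm x) = false := by
            rw [Bool.eq_false_iff]
            intro hcc
            exact hnotmem (List.contains_iff_mem.mp hcc)
          simp [PySem.Set.add, hnotmem]
        have hupd : PySem.Set.update d.keys (pvNorm x :: xs.map pvNorm)
            = PySem.Set.update (d.keys ++ [pvNorm x]) (xs.map pvNorm) := by
          simp [PySem.Set.update, hadd]
        rw [hupd, ← hkeys]
        apply ih (s + 1) (d.insert (pvNorm x) s)
        · intro v hvv
          rcases PySem.Dict.mem_values_insert _ _ _ _ hvv with rfl | hvv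
          · omega
          · exact lt_trans (hv v hvv) (by omega)
        · rw [hitems]
          rw [List.pairwise_append]
          refine ⟨hp, List.pairwise_singleton _ _, ?_⟩
          intro p hpmem q hq
          rw [List.mem_singleton] at hq
          subst hq
          have : p.2 ∈ d.values := by
            simp only [PySem.Dict.values]
            exact List.mem_map_of_mem hpmem
          exact hv _ this

-- B's chosen fold is the lookup fold restricted to first_pos keys, with positions prepended
lemma chosen_fold_get? (fp : PySem.Dict String Int) (l : List (Int × String))
    (d1 : PySem.Dict String (Int × Int × String)) (d2 : PySem.Dict String (Int × String))
    (h : ∀ k, d1.get? k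
      = if fp.contains k = true then (d2.get? k).map (fun p => (fp.getD k 0, p.1, p.2)) else none)
    (k : String) :
    (l.foldl
      (fun d p =>
        if fp.contains (pvNorm p.2) then d.insert (pvNorm p.2) (fp.getD (pvNorm p.2) 0, p.1, p.2)
        else d) d1).get? k
    = if fp.contains k = true then
        ((l.foldl (fun d p => d.insert (pvNorm p.2) p) d2).get? k).map (fun p => (fp.getD k 0, p.1, p.2))
      else none := by
  induction l generalizing d1 d2 with
  | nil => exact h k
  | cons q l ihl =>
      simp only [List.foldl_cons]
      by_cases hc : fp.contains (pvNorm q.2) = true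
      · rw [if_pos hc]
        apply ihl
        intro k'
        rw [PySem.Dict.get?_insert, PySem.Dict.get?_insert]
        by_cases hk : k' = pvNorm q.2
        · subst hk; simp [hc]
        · simp [hk, h k']
      · rw [if_neg hc]
        apply ihl
        intro k'
        rw [PySem.Dict.get?_insert]
        by_cases hk : k' = pvNorm q.2
        · subst hk; simp [h _, hc]
        · simp [hk, h k']

lemma chosen_get? (categories : List (Int × String)) (names : List String) (k : String) :
    (pvChosen categories names).get? k
      = if (pvFP names).contains k = true then
          ((pvLookup categories).get? k).map (fun p => ((pvFP names).getD k 0, p.1, p.2))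
        else none := by
  apply chosen_fold_get?
  intro k'
  simp [PySem.Dict.get?_empty]

-- chosen keeps its keys unique (each step inserts or leaves the dict alone)
lemma chosen_keys_nodup (categories : List (Int × String)) (names : List String) :
    (pvChosen categories names).keys.Nodup := by
  unfold pvChosen
  generalize (pvCats categories).items = l
  have : ∀ (d : PySem.Dict String (Int × Int × String)), d.keys.Nodup →
      (l.foldl
        (fun d p =>
          if (pvFP names).contains (pvNorm p.2) then
            d.insert (pvNorm p.2) ((pvFP names).getD (pvNorm p.2) 0, p.1, p.2)
          else d) d).keys.Nodup := by
    induction l with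
    | nil => intro d hd; exact hd
    | cons q l ihl =>
        intro d hd
        simp only [List.foldl_cons]
        by_cases hc : (pvFP names).contains (pvNorm q.2) = true
        · rw [if_pos hc]; exact ihl _ (PySem.Dict.nodup_keys_insert _ _ _ hd)
        · rw [if_neg hc]; exact ihl _ hd
  exact this PySem.Dict.empty PySem.Dict.nodup_keys_empty

-- ===== VERDICT (by name: the statement is the Claim_ definition above) =====
theorem resolve_selected_categories_spec : Claim_equal_resolve_selected_categories := by
  intro categories selected_names _hdom hpre
  unfold Spec_resolve_selected_categories
  simp only [resolve_selected_categories, resolve_selected_categories_alt]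
  have ecats : PySem.Dict.ofList categories = pvCats categories := rfl
  have enti : (pvCats categories).items.foldl (fun d p => d.insert (pvNorm p.2) p.1) PySem.Dict.empty
      = pvNameToId categories := rfl
  rw [ecats, enti]
  set sel := selected_names.getD [] with hseldef
  by_cases hempty : sel.isEmpty
  · rw [if_pos hempty, if_pos hempty]
  · rw [if_neg hempty, if_neg hempty]
    have efp : (PySem.List.enumerate sel 0).foldl (fun d p => d.setdefault (pvNorm p.2) p.1)
        PySem.Dict.empty = pvFP sel := rfl
    have echosen : (pvCats categories).items.foldl
        (fun d p =>
          if (pvFP sel).contains (pvNorm p.2) then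
            d.insert (pvNorm p.2) ((pvFP sel).getD (pvNorm p.2) 0, p.1, p.2)
          else d) PySem.Dict.empty = pvChosen categories sel := rfl
    rw [efp, echosen]
    -- names D for the deduplicated normalized requests and g for B's triple map
    set D := PySem.Set.update ([] : List String) (sel.map pvNorm) with hDdef
    have hDof : D = PySem.Set.ofList (sel.map pvNorm) := rfl
    have hDnodup : D.Nodup := by rw [hDof]; exact PySem.Set.nodup_ofList _
    have hmemD : ∀ n, n ∈ D ↔ n ∈ sel.map pvNorm := by
      intro n; rw [hDof]; exact PySem.Set.mem_ofList _ _
    -- Pre_ gives: every selected name's normalization is a key of the lookup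
    have hres : ∀ r ∈ sel, (pvLookup categories).contains (pvNorm r) = true := by
      intro r hrmem
      unfold Pre_resolve_selected_categories at hpre
      rw [← hseldef] at hpre
      have hmem := List.contains_iff_mem.mp (List.all_eq_true.mp hpre r hrmem)
      exact (lookup_contains_iff categories (pvNorm r)).mpr hmem
    have hresD : ∀ n ∈ D, (pvLookup categories).contains n = true := by
      intro n hn
      obtain ⟨r, hr, rfl⟩ := List.mem_map.mp ((hmemD n).mp hn)
      exact hres r hr
    -- A's loop
    have hloop := loopA_eq categories sel hres [] [] (by intro x hx; simp at hx)
    simp only [List.map_nil] at hloop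
    rw [show (PySem.Set.ofList ([] : List Int)) = PySem.Set.empty from rfl] at hloop
    rw [hloop]
    simp only [List.isEmpty_nil, if_true]
    -- B's first_pos dict
    have hfpinv := fp_fold_invariant sel 0 PySem.Dict.empty
      (by intro v hv
          rw [show (PySem.Dict.empty : PySem.Dict String Int).values = [] from rfl] at hv
          cases hv)
      (by rw [show (PySem.Dict.empty : PySem.Dict String Int).items = [] from rfl]
          exact List.Pairwise.nil)
    rw [efp] at hfpinv
    have hkD : (pvFP sel).keys = D := by rw [hfpinv.1]; rfl
    have hfpnodup : (pvFP sel).keys.Nodup := by rw [hkD]; exact hDnodup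
    have hfpcont : ∀ n, (pvFP sel).contains n = true ↔ n ∈ D := by
      intro n
      rw [PySem.Dict.contains_iff_mem_keys, hkD]
    -- B's chosen dict: lookup values on D, positions prepended
    have hchget : ∀ n ∈ D, (pvChosen categories sel).get? n
        = some ((pvFP sel).getD n 0, pvF1 categories n, pvF2 categories n) := by
      intro n hn
      obtain ⟨p, hp⟩ : ∃ p, (pvLookup categories).get? n = some p := by
        have hc := hresD n hn
        rw [PySem.Dict.contains_eq_isSome_get?] at hc
        exact Option.isSome_iff_exists.mp hc
      rw [chosen_get?, if_pos ((hfpcont n).mpr hn), hp]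
      simp [pvF1, pvF2, PySem.Dict.getD_eq_get?_getD, hp]
    have hchmem : ∀ k, k ∈ (pvChosen categories sel).keys ↔ k ∈ D := by
      intro k
      rw [← PySem.Dict.contains_iff_mem_keys, PySem.Dict.contains_eq_isSome_get?]
      constructor
      · intro hk
        rw [chosen_get?] at hk
        by_cases hc : (pvFP sel).contains k = true
        · exact (hfpcont k).mp hc
        · rw [if_neg hc] at hk; simp at hk
      · intro hk
        rw [hchget k hk]
        rfl
    have hpermk : (pvChosen categories sel).keys.Perm D :=
      (List.perm_ext_iff_of_nodup (chosen_keys_nodup categories sel) hDnodup).mpr hchmem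
    -- the size test fails: no unknown names
    have hsize : ¬ ((pvChosen categories sel).size < (pvFP sel).size) := by
      have h1 : (pvChosen categories sel).size = (pvChosen categories sel).keys.length := by
        simp [PySem.Dict.size, PySem.Dict.keys]
      have h2 : (pvFP sel).size = (pvFP sel).keys.length := by
        simp [PySem.Dict.size, PySem.Dict.keys]
      rw [h1, h2, hpermk.length_eq, hkD]
      omega
    rw [if_neg hsize]
    -- B's values, permuted into D's order by the sort
    have hvals : (pvChosen categories sel).values
        = (pvChosen categories sel).keys.map
            (fun n => ((pvFP sel).getD n 0, pvF1 categories n, pvF2 categories n)) := by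
      rw [PySem.Dict.values_eq_map_keys _ (chosen_keys_nodup categories sel) (0, 0, "")]
      apply List.map_congr_left
      intro k hk
      rw [PySem.Dict.getD_eq_get?_getD, hchget k ((hchmem k).mp hk)]
      rfl
    have hpermv : (D.map (fun n => ((pvFP sel).getD n 0, pvF1 categories n, pvF2 categories n))).Perm
        (pvChosen categories sel).values := by
      rw [hvals]
      exact (hpermk.map _).symm
    have hfppair : D.Pairwise (fun a b => (pvFP sel).getD a 0 < (pvFP sel).getD b 0) := by
      have hpairs := hfpinv.2
      rw [PySem.Dict.items_eq_map_keys _ hfpnodup 0] at hpairs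
      rw [List.pairwise_map] at hpairs
      rw [← hkD]
      exact hpairs
    have hpairg : (D.map (fun n => ((pvFP sel).getD n 0, pvF1 categories n, pvF2 categories n))).Pairwise
        (fun a b => a.1 < b.1) := by
      rw [List.pairwise_map]
      exact hfppair
    rw [PySem.List.sorted_eq_of_perm_of_pairwise_lt _ _ _ hpermv hpairg]
    simp only [List.map_map, Function.comp_def, Prod.mk.injEq]
    exact ⟨rfl, rfl⟩
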